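-- pv_equiv track=rewrite | github.com/Whiplashzeb/relation_extraction_edition2 | extraction/inner_sentence.py | contain_entities
-- ===== SOURCE A (Python) =====
-- def contain_entities(sentence):
--     sentence = sentence.split()
--
--     contain_chemical = False
--     contain_disease = False
--
--     for word in sentence:
--         if "C_D" in word or "C_C" in word:
--             contain_chemical = True
--         if "D_D" in word or "D_C" in word:
--             contain_disease = True
--
--     if contain_chemical == True and contain_disease == True:
--         return True
--     else:
--         return False
-- ===== SOURCE B (Python) =====
-- def contain_entities(sentence):
--     # Markers contain no whitespace, so they occur in some split() token
--     # iff they occur in the whole sentence: direct substring search, no tokenization.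
--     return ("C_D" in sentence or "C_C" in sentence) and \
--            ("D_D" in sentence or "D_C" in sentence)
-- ===== Notes on version B (the rewrite author's own statement) =====
-- stated objective: simpler
-- what changed: Drops the split()/tokenize-and-loop pass entirely and tests the four markers as substrings of the whole sentence (valid because the markers contain no whitespace).
import Mathlib
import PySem

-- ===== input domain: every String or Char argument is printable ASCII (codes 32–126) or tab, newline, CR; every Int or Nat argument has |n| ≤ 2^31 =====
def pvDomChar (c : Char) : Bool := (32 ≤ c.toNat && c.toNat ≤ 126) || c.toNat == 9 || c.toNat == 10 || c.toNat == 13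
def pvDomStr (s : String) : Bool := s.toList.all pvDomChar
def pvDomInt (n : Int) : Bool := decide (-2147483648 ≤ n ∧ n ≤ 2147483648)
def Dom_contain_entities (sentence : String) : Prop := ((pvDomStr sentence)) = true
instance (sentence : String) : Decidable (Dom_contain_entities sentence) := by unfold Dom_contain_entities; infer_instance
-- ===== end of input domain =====

-- B drops A's split()/word-loop and checks the four markers as substrings of the
-- whole sentence (the markers contain no whitespace): simpler, single-pass searches.

-- ===== PORT A =====
def contain_entities (sentence : String) : Bool :=
  let words := PySem.Str.split₀ sentence
  let st := words.foldl (fun (st : Bool × Bool) word =>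
      let cc := if PySem.Str.isIn "C_D" word || PySem.Str.isIn "C_C" word then true else st.1
      let cd := if PySem.Str.isIn "D_D" word || PySem.Str.isIn "D_C" word then true else st.2
      (cc, cd)) (false, false)
  if st.1 == true && st.2 == true then true else false

-- ===== PORT B =====
def contain_entities_alt (sentence : String) : Bool :=
  (PySem.Str.isIn "C_D" sentence || PySem.Str.isIn "C_C" sentence) &&
  (PySem.Str.isIn "D_D" sentence || PySem.Str.isIn "D_C" sentence)

-- ===== PRECONDITION & SPEC =====
def Spec_contain_entities (sentence : String) (out : Bool) : Prop := out = contain_entities_alt sentence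
instance (sentence : String) (out : Bool) : Decidable (Spec_contain_entities sentence out) := by unfold Spec_contain_entities; infer_instance

-- ===== CLAIM (what is proved, stated in full; the proofs are below) =====
def Claim_equal_contain_entities : Prop := ∀ (sentence : String), Dom_contain_entities sentence → Spec_contain_entities sentence (contain_entities sentence)

-- ===== LEMMAS AND PROOFS =====

-- A prefix of X ++ c :: Y that avoids c stays a prefix of X.
theorem pv_prefix_avoid {sub X Y : List Char} {c : Char}
    (hno : c ∉ sub) (h : sub <+: X ++ c :: Y) : sub <+: X := by
  induction X generalizing sub with
  | nil =>
    cases sub with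
    | nil => exact List.nil_prefix
    | cons a t =>
      rcases List.cons_prefix_cons.mp h with ⟨rfl, _⟩
      exact absurd (List.mem_cons_self) hno
  | cons x X' ih =>
    cases sub with
    | nil => exact List.nil_prefix
    | cons a t =>
      rcases List.cons_prefix_cons.mp h with ⟨rfl, ht⟩
      exact List.cons_prefix_cons.mpr ⟨rfl, ih (fun hm => hno (List.mem_cons_of_mem _ hm)) ht⟩

-- A nonempty infix avoiding c of X ++ c :: Y lies in X or in Y.
theorem pv_infix_split {sub X Y : List Char} {c : Char}
    (hne : sub ≠ []) (hno : c ∉ sub) :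
    sub <:+: X ++ c :: Y ↔ sub <:+: X ∨ sub <:+: Y := by
  constructor
  · intro h
    induction X with
    | nil =>
      rcases List.infix_cons_iff.mp h with hp | hi
      · cases sub with
        | nil => exact absurd rfl hne
        | cons a t =>
          rcases List.cons_prefix_cons.mp hp with ⟨rfl, _⟩
          exact absurd (List.mem_cons_self) hno
      · exact Or.inr hi
    | cons x X' ih =>
      rcases List.infix_cons_iff.mp h with hp | hi
      · exact Or.inl ((pv_prefix_avoid (X := x :: X') hno hp).isInfix)
      · rcases ih hi with h1 | h2
        · exact Or.inl (List.infix_cons h1)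
        · exact Or.inr h2
  · rintro (h | h)
    · exact h.trans (List.prefix_append _ _).isInfix
    · exact h.trans ((List.suffix_cons c Y).trans (List.suffix_append _ _)).isInfix

-- any-word-contains for split₀.go, with cur the reversed current (whitespace-free) word.
theorem pv_go_any {sub : List Char} (hne : sub ≠ [])
    (hno : ∀ x ∈ sub, PySem.Chars.isspace x = false) :
    ∀ (s cur : List Char) (acc : List (List Char)),
      (∀ x ∈ cur, PySem.Chars.isspace x = false) →
      ((∃ w ∈ PySem.Chars.split₀.go s cur acc, sub <:+: w) ↔
        (∃ w ∈ acc, sub <:+: w) ∨ sub <:+: (cur.reverse ++ s)) := by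
  intro s
  induction s with
  | nil =>
    intro cur acc _
    simp only [PySem.Chars.split₀.go]
    by_cases hc : cur.isEmpty
    · simp only [hc]
      rw [List.isEmpty_iff.mp hc]
      simp only [List.reverse_nil, List.append_nil]
      constructor
      · intro ⟨w, hw, hi⟩; exact Or.inl ⟨w, List.mem_reverse.mp hw, hi⟩
      · rintro (⟨w, hw, hi⟩ | hi)
        · exact ⟨w, List.mem_reverse.mpr hw, hi⟩
        · exact absurd (List.infix_nil.mp hi) hne
    · simp only [hc, Bool.false_eq_true, if_false, List.append_nil]
      constructor
      · intro ⟨w, hw, hi⟩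
        rcases List.mem_cons.mp (List.mem_reverse.mp hw) with rfl | hw'
        · exact Or.inr hi
        · exact Or.inl ⟨w, hw', hi⟩
      · rintro (⟨w, hw, hi⟩ | hi)
        · exact ⟨w, List.mem_reverse.mpr (List.mem_cons_of_mem _ hw), hi⟩
        · exact ⟨cur.reverse, List.mem_reverse.mpr List.mem_cons_self, hi⟩
  | cons c rest ih =>
    intro cur acc hcur
    simp only [PySem.Chars.split₀.go]
    by_cases hsp : PySem.Chars.isspace c
    · have hnoc : c ∉ sub := fun hm => by simp [hno c hm] at hsp
      simp only [hsp]
      by_cases hc : cur.isEmpty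
      · simp only [hc, if_true]
        rw [ih [] acc (by simp)]
        rw [List.isEmpty_iff.mp hc]
        simp only [List.reverse_nil, List.nil_append]
        rw [show (c :: rest = [] ++ c :: rest) from rfl, pv_infix_split hne hnoc]
        constructor
        · rintro (h | h)
          · exact Or.inl h
          · exact Or.inr (Or.inr h)
        · rintro (h | h | h)
          · exact Or.inl h
          · exact absurd (List.infix_nil.mp h) hne
          · exact Or.inr h
      · simp only [hc, Bool.false_eq_true, if_false]
        rw [if_pos trivial, ih [] (cur.reverse :: acc) (by simp)]
        simp only [List.reverse_nil, List.nil_append]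
        rw [pv_infix_split hne hnoc]
        constructor
        · rintro (⟨w, hw, hi⟩ | h)
          · rcases List.mem_cons.mp hw with rfl | hw'
            · exact Or.inr (Or.inl hi)
            · exact Or.inl ⟨w, hw', hi⟩
          · exact Or.inr (Or.inr h)
        · rintro (⟨w, hw, hi⟩ | h | h)
          · exact Or.inl ⟨w, List.mem_cons_of_mem _ hw, hi⟩
          · exact Or.inl ⟨cur.reverse, List.mem_cons_self, h⟩
          · exact Or.inr h
    · simp only [hsp, Bool.false_eq_true, if_false]
      rw [ih (c :: cur) acc
        (by intro x hx; rcases List.mem_cons.mp hx with rfl | hx'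
            · exact Bool.eq_false_iff.mpr hsp
            · exact hcur x hx')]
      simp
-- marker occurs in some split() word iff in the whole string
theorem pv_split_any {sub : List Char} (hne : sub ≠ [])
    (hno : ∀ x ∈ sub, PySem.Chars.isspace x = false) (s : List Char) :
    (∃ w ∈ PySem.Chars.split₀ s, sub <:+: w) ↔ sub <:+: s := by
  rw [PySem.Chars.split₀, pv_go_any hne hno s [] [] (by simp)]
  simp

-- fold characterization of A's loop
theorem pv_fold (words : List String) (st : Bool × Bool) :
    words.foldl (fun (st : Bool × Bool) word =>
      let cc := if PySem.Str.isIn "C_D" word || PySem.Str.isIn "C_C" word then true else st.1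
      let cd := if PySem.Str.isIn "D_D" word || PySem.Str.isIn "D_C" word then true else st.2
      (cc, cd)) st =
    (st.1 || words.any (fun w => PySem.Str.isIn "C_D" w || PySem.Str.isIn "C_C" w),
     st.2 || words.any (fun w => PySem.Str.isIn "D_D" w || PySem.Str.isIn "D_C" w)) := by
  induction words generalizing st with
  | nil => simp
  | cons w ws ih =>
    simp only [List.foldl_cons, List.any_cons, ih]
    rw [Prod.mk.injEq]
    constructor <;> split_ifs with h <;>
      [skip; (rw [Bool.not_eq_true] at h); skip; (rw [Bool.not_eq_true] at h)] <;>
      simp only [h, Bool.true_or, Bool.or_true, Bool.false_or]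

theorem pv_marker_any (m : String) (hne : m.toList ≠ [])
    (hno : ∀ x ∈ m.toList, PySem.Chars.isspace x = false) (s : String) :
    (PySem.Str.split₀ s).any (fun w => PySem.Str.isIn m w) = PySem.Str.isIn m s := by
  rw [Bool.eq_iff_iff, List.any_eq_true, PySem.Str.isIn_iff_infix]
  constructor
  · rintro ⟨w, hw, hi⟩
    rw [PySem.Str.isIn_iff_infix] at hi
    refine (pv_split_any hne hno s.toList).mp ⟨w.toList, ?_, hi⟩
    rw [← PySem.Str.split₀_map_toList]
    exact List.mem_map_of_mem hw
  · intro hi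
    obtain ⟨w, hw, hsub⟩ := (pv_split_any hne hno s.toList).mpr hi
    rw [← PySem.Str.split₀_map_toList, List.mem_map] at hw
    obtain ⟨w', hw', rfl⟩ := hw
    exact ⟨w', hw', (PySem.Str.isIn_iff_infix m w').mpr hsub⟩

theorem pv_any_or (p q : String → Bool) (ws : List String) :
    ws.any (fun w => p w || q w) = (ws.any p || ws.any q) := by
  induction ws with
  | nil => simp
  | cons w ws ih =>
    rw [List.any_cons, List.any_cons, List.any_cons, ih]
    cases p w <;> cases q w <;> simp [Bool.or_comm]

-- ===== VERDICT (by name: the statement is the Claim_ definition above) =====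
theorem pv_marker_spaceless : ∀ m ∈ ["C_D", "C_C", "D_D", "D_C"],
    m.toList ≠ [] ∧ ∀ x ∈ m.toList, PySem.Chars.isspace x = false := by
  intro m hm
  fin_cases hm <;>
    exact ⟨by simp, by intro x hx; simp only [String.toList] at hx; fin_cases hx <;> rfl⟩


theorem contain_entities_spec : Claim_equal_contain_entities := by
  intro s _
  show contain_entities s = contain_entities_alt s
  dsimp only [contain_entities, contain_entities_alt]
  rw [pv_fold]
  simp only [Bool.false_or]
  rw [pv_any_or, pv_any_or,
    pv_marker_any "C_D" (pv_marker_spaceless _ (by simp)).1 (pv_marker_spaceless _ (by simp)).2 s,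
    pv_marker_any "C_C" (pv_marker_spaceless _ (by simp)).1 (pv_marker_spaceless _ (by simp)).2 s,
    pv_marker_any "D_D" (pv_marker_spaceless _ (by simp)).1 (pv_marker_spaceless _ (by simp)).2 s,
    pv_marker_any "D_C" (pv_marker_spaceless _ (by simp)).1 (pv_marker_spaceless _ (by simp)).2 s]
  simp only [beq_true]
  split_ifs with h
  · exact h.symm
  · exact (Bool.not_eq_true _ ▸ h).symm
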